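-- pv_equiv track=rewrite | github.com/maryqu3en/CP-PY | set4.py | encrypt_this
-- ===== SOURCE A (Python) =====
-- def encrypt_this(text):
--     text = text.split()
--     for i, word in enumerate(text):
--         if word:
--             if len(word) == 1:
--                 word = str(ord(word))
--             elif len(word) == 2:
--                 word = str(ord(word[0])) + word[1]
--             else:
--                 word = str(ord(word[0])) + word[-1] + word[2:-1] + word[1]
--             text[i] = word
--     return ' '.join(text)
-- ===== SOURCE B (Python) =====
-- def encrypt_this(text):
--     out = []
--     i, n = 0, len(text)
--     while i < n:
--         if text[i] in ' \t\n\r':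
--             i += 1
--             continue
--         j = i
--         while j < n and text[j] not in ' \t\n\r':
--             j += 1
--         w = text[i:j]
--         m = j - i
--         out.append(str(ord(w[0])) + ''.join(
--             w[m - 1] if k == 1 else (w[1] if k == m - 1 else w[k])
--             for k in range(1, m)))
--         i = j
--     return ' '.join(out)
-- ===== Notes on version B (the rewrite author's own statement) =====
-- stated objective: alternative
-- what changed: Replaces split()+enumerate write-back and three length-based slicing branches by a two-pointer character scanner that tokenizes the text by hand and encodes each word with a single uniform index-permutation comprehension (k=1 -> last char, k=m-1 -> second char, else k).
import Mathlib
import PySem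

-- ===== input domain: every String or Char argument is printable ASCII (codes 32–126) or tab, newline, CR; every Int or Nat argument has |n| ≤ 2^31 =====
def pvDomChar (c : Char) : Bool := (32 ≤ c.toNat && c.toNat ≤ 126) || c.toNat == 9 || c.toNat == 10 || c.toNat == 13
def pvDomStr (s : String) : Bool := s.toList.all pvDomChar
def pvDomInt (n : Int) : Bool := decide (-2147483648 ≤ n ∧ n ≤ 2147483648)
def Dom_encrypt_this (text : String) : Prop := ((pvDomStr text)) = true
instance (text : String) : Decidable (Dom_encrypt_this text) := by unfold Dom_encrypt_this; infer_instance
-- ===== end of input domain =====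

-- B replaces A's split()+enumerate write-back with three length branches by a hand-written
-- two-pointer scanner and one uniform index-permutation per word (alternative decomposition).

-- ===== PORT A =====
-- word transformation of A, literally the body of A's 'if word:' branch
def pvEncWordA (w : List Char) : List Char :=
  if w.length = 1 then
    PySem.Int.toChars ((PySem.List.pyGetD w 0 ' ').toNat : Int)
  else if w.length = 2 then
    PySem.Int.toChars ((PySem.List.pyGetD w 0 ' ').toNat : Int) ++ [PySem.List.pyGetD w 1 ' ']
  else
    PySem.Int.toChars ((PySem.List.pyGetD w 0 ' ').toNat : Int) ++ [PySem.List.pyGetD w (-1) ' ']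
      ++ PySem.List.slice w (some 2) (some (-1)) ++ [PySem.List.pyGetD w 1 ' ']

-- A: split, then a for-loop over enumerate(text) writing the transformed word back at index i
def encrypt_this (text : String) : String :=
  let ws := PySem.Chars.split₀ text.toList
  let ws := (PySem.List.enumerate ws).foldl
    (fun acc iw => if iw.2 ≠ [] then PySem.List.pySetD acc iw.1 (pvEncWordA iw.2) else acc) ws
  String.mk (PySem.Chars.join [' '] ws)

-- ===== PORT B =====
-- Source B's membership test `c in ' \t\n\r'`
def pvIsWsB (c : Char) : Bool := c == ' ' || c == '\t' || c == '\n' || c == '\r'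

-- Source B's inner while loop: how far j advances past i, counted on the remaining characters
def pvWordLenB : List Char → Nat
  | [] => 0
  | c :: r => if pvIsWsB c then 0 else pvWordLenB r + 1

-- Source B's per-word encoding: str(ord(w[0])) + one comprehension over range(1, m)
def pvEncWordB (w : List Char) : List Char :=
  let m := w.length
  PySem.Int.toChars ((PySem.List.pyGetD w 0 ' ').toNat : Int) ++
    (PySem.List.pyRange 1 m 1).map (fun k =>
      if k = 1 then PySem.List.pyGetD w ((m : Int) - 1) ' '
      else if k = (m : Int) - 1 then PySem.List.pyGetD w 1 ' '
      else PySem.List.pyGetD w k ' ')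

-- termination fact for the scanner (cited by decreasing_by)
theorem pvWordLenB_pos (c : Char) (r : List Char) (h : ¬ pvIsWsB c = true) :
    0 < pvWordLenB (c :: r) := by
  simp [pvWordLenB, h]

-- Source B's outer while loop: skip one whitespace char, or cut the word text[i:j] and encode it
def pvScanB : List Char → List (List Char)
  | [] => []
  | c :: rest =>
    if _h : pvIsWsB c then pvScanB rest
    else
      let k := pvWordLenB (c :: rest)
      pvEncWordB ((c :: rest).take k) :: pvScanB ((c :: rest).drop k)
  termination_by s => s.length
  decreasing_by
  · simp
  · have := pvWordLenB_pos c rest _h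
    simp [List.length_drop]
    omega

def encrypt_this_alt (text : String) : String :=
  String.mk (PySem.Chars.join [' '] (pvScanB text.toList))

-- ===== PRECONDITION & SPEC =====
def Spec_encrypt_this (text : String) (out : String) : Prop := out = encrypt_this_alt text
instance (text : String) (out : String) : Decidable (Spec_encrypt_this text out) := by unfold Spec_encrypt_this; infer_instance

-- ===== CLAIM (what is proved, stated in full; the proofs are below) =====
def Claim_equal_encrypt_this : Prop := ∀ (text : String), Dom_encrypt_this text → Spec_encrypt_this text (encrypt_this text)

-- ===== LEMMAS AND PROOFS =====

-- the plain tokenizer underlying B's scanner (proof helper)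
def pvTok : List Char → List (List Char)
  | [] => []
  | c :: rest =>
    if _h : pvIsWsB c then pvTok rest
    else (c :: rest).take (pvWordLenB (c :: rest)) :: pvTok ((c :: rest).drop (pvWordLenB (c :: rest)))
  termination_by s => s.length
  decreasing_by
  · simp
  · have := pvWordLenB_pos c rest _h
    simp [List.length_drop]
    omega

theorem pvScanB_eq_map (l : List Char) : pvScanB l = (pvTok l).map pvEncWordB := by
  fun_induction pvScanB l with
  | case1 => simp [pvTok]
  | case2 c rest h ih => rw [pvTok.eq_def]; simp [h, ih]
  | case3 c rest h k ih => rw [pvTok.eq_def]; simp only [h]; simp; exact ⟨rfl, ih⟩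
theorem pvWordLenB_take (l : List Char) :
    l.take (pvWordLenB l) = l.takeWhile (fun c => !pvIsWsB c) := by
  induction l with
  | nil => rfl
  | cons c r ih =>
    by_cases h : pvIsWsB c <;> simp [pvWordLenB, h, ih]
theorem pvWordLenB_drop (l : List Char) :
    l.drop (pvWordLenB l) = l.dropWhile (fun c => !pvIsWsB c) := by
  induction l with
  | nil => rfl
  | cons c r ih =>
    by_cases h : pvIsWsB c <;> simp [pvWordLenB, h, ih]
theorem pvTok_cons (c : Char) (rest : List Char) :
    pvTok (c :: rest) =
      if pvIsWsB c then pvTok rest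
      else ((c :: rest).takeWhile (fun c => !pvIsWsB c)) ::
        pvTok ((c :: rest).dropWhile (fun c => !pvIsWsB c)) := by
  rw [pvTok.eq_def]
  by_cases h : pvIsWsB c <;> simp [h, pvWordLenB_take, pvWordLenB_drop]
theorem pvTok_ne_nil (l : List Char) : ∀ w ∈ pvTok l, w ≠ [] := by
  fun_induction pvTok l with
  | case1 => simp [pvTok]
  | case2 c rest h ih => exact ih
  | case3 c rest h ih =>
    intro w hw
    rcases List.mem_cons.mp hw with hw | hw
    · subst hw
      simp [pvWordLenB, h]
    · exact ih w hw

theorem charEqNat (c d : Char) : (c == d) = decide (c.toNat = d.toNat) := by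
  by_cases h : c = d
  · subst h; simp
  · have h2 : c.toNat ≠ d.toNat := fun hn => h (Char.ext (UInt32.toNat_inj.mp hn))
    simp [h, h2]
theorem isspace_eq_pvIsWsB (c : Char) (h : pvDomChar c = true) :
    PySem.Chars.isspace c = pvIsWsB c := by
  have hd : ((32 ≤ c.toNat ∧ c.toNat ≤ 126) ∨ c.toNat = 9 ∨ c.toNat = 10) ∨ c.toNat = 13 := by
    simpa [pvDomChar, Bool.or_eq_true, Bool.and_eq_true, decide_eq_true_eq, or_assoc] using h
  rw [Bool.eq_iff_iff]
  rw [pvIsWsB, charEqNat c ' ', charEqNat c '\t', charEqNat c '\n', charEqNat c '\r',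
    PySem.Chars.isspace]
  simp only [Bool.or_eq_true, Bool.and_eq_true, decide_eq_true_eq]
  rw [show (' ').toNat = 32 from rfl, show ('\t').toNat = 9 from rfl,
    show ('\n').toNat = 10 from rfl, show ('\r').toNat = 13 from rfl]
  constructor
  · intro hs; omega
  · intro hs; omega

theorem split₀_go_eq (s : List Char) : ∀ (cur : List Char) (acc : List (List Char)),
    (∀ c ∈ s, pvDomChar c = true) →
    PySem.Chars.split₀.go s cur acc =
      acc.reverse ++ (if cur.isEmpty then pvTok s
        else (cur.reverse ++ s.takeWhile (fun c => !pvIsWsB c)) ::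
          pvTok (s.dropWhile (fun c => !pvIsWsB c))) := by
  induction s with
  | nil =>
    intro cur acc _
    rw [PySem.Chars.split₀.go]
    by_cases h : cur.isEmpty <;> simp [h, pvTok]
  | cons c rest ih =>
    intro cur acc hdom
    have hc : PySem.Chars.isspace c = pvIsWsB c :=
      isspace_eq_pvIsWsB c (hdom c (by simp))
    have hrest : ∀ x ∈ rest, pvDomChar x = true := fun x hx => hdom x (by simp [hx])
    rw [PySem.Chars.split₀.go, hc]
    by_cases hws : pvIsWsB c
    · rw [pvTok_cons, List.takeWhile_cons, List.dropWhile_cons]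
      by_cases hcur : cur.isEmpty
      · simp only [hws, hcur, if_true, ih [] acc hrest]
        simp [hws]
      · simp only [hws, hcur, if_true, if_false, ih [] (cur.reverse :: acc) hrest]
        simp [pvTok_cons, hws]
    · rw [pvTok_cons, List.takeWhile_cons, List.dropWhile_cons]
      have hne : ((c :: cur).isEmpty) = false := by simp
      simp only [hws, if_false, ih (c :: cur) acc hrest, hne, Bool.false_eq_true]
      by_cases hcur : cur.isEmpty
      · have : cur = [] := by simpa [List.isEmpty_iff] using hcur
        subst this
        simp [hws]
      · simp [hcur, hws]
theorem split₀_eq_pvTok (l : List Char) (h : ∀ c ∈ l, pvDomChar c = true) :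
    PySem.Chars.split₀ l = pvTok l := by
  have := split₀_go_eq l [] [] h
  simpa [PySem.Chars.split₀] using this

theorem pvMapRangeGetD (u : List Char) (a b : Nat) (hb : b ≤ u.length) :
    (PySem.List.pyRange (a : Int) (b : Int) 1).map (fun i => PySem.List.pyGetD u i ' ')
      = (u.take b).drop a := by
  induction b with
  | zero => simp [PySem.List.pyRange_one_eq_nil]
  | succ b ih =>
    by_cases hab : a ≤ b
    · rw [show (((b + 1 : Nat)) : Int) = (b : Int) + 1 by push_cast; ring]
      rw [PySem.List.pyRange_one_succ_right (by exact_mod_cast hab), List.map_append]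
      rw [ih (by omega)]
      have hb' : b < u.length := by omega
      have hgd : PySem.List.pyGetD u (b : Int) ' ' = u[b] := by
        rw [PySem.List.pyGetD_natCast]
        simp [List.getD, hb']
      simp only [List.map_cons, List.map_nil, hgd]
      rw [List.take_succ, List.getElem?_eq_getElem hb']
      rw [List.drop_append_of_le_length (by simp; omega)]
      simp
    · have h0 : (PySem.List.pyRange (a : Int) (((b+1:Nat)) : Int) 1) = [] := by
        apply PySem.List.pyRange_one_eq_nil
        push_cast
        omega
      rw [h0]
      have hlen : (u.take (b+1)).length ≤ a := by
        simp
        omega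
      simp [List.drop_eq_nil_of_le hlen]
theorem pvEncWord_eq (w : List Char) (hw : w ≠ []) : pvEncWordA w = pvEncWordB w := by
  match w, hw with
  | [c], _ =>
    simp [pvEncWordA, pvEncWordB, PySem.List.pyRange_one_eq_nil]
  | [c, d], _ =>
    have h1 : PySem.List.pyRange 1 2 = [1] := by decide
    simp only [pvEncWordA, pvEncWordB, List.length_cons, List.length_nil]
    norm_num
    rw [h1]
    simp
  | c :: d :: e :: t, _ =>
    set w := c :: d :: e :: t with hwdef
    have hwne : w ≠ [] := by simp [hwdef]
    have hn3 : 3 ≤ w.length := by simp [hwdef]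
    have hne1 : ¬ w.length = 1 := by omega
    have hne2 : ¬ w.length = 2 := by omega
    have hA1 : PySem.List.pyGetD w 1 ' ' = d := by
      rw [show (1 : Int) = ((1 : Nat) : Int) by norm_num, PySem.List.pyGetD_natCast]
      simp [hwdef]
    have hAlast : PySem.List.pyGetD w (-1) ' ' = w.getLast hwne :=
      PySem.List.pyGetD_neg_one w ' ' hwne
    have hslice : PySem.List.slice w (some 2) (some (-1)) = (w.drop 2).take (w.length - 3) := by
      rw [PySem.List.slice]
      have hc1 : PySem.List.clampIdx w.length 2 = 2 := by
        simp [PySem.List.clampIdx]; omega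
      have hc2 : PySem.List.clampIdx w.length (-1) = w.length - 1 := by
        simp [PySem.List.clampIdx]; omega
      simp only [hc1, hc2]
      congr 1
    have hsplit : PySem.List.pyRange 1 (w.length : Int) 1 =
        [1] ++ PySem.List.pyRange 2 ((w.length : Int) - 1) 1 ++ [(w.length : Int) - 1] := by
      rw [PySem.List.pyRange_one_append 1 2 (w.length : Int) (by norm_num) (by exact_mod_cast by omega : (2:Int) ≤ (w.length : Int)),
          PySem.List.pyRange_one_append 2 ((w.length : Int) - 1) (w.length : Int)
            (by omega) (by omega)]
      have hs1 : PySem.List.pyRange ((w.length : Int) - 1) (w.length : Int) 1 = [(w.length : Int) - 1] := by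
        have := PySem.List.pyRange_one_singleton ((w.length : Int) - 1)
        simpa using this
      have hs2 : PySem.List.pyRange 1 2 1 = [1] := by decide
      rw [hs1, hs2]
      simp
    have hgetlast : PySem.List.pyGetD w ((w.length : Int) - 1) ' ' = w.getLast hwne := by
      rw [show ((w.length : Int) - 1) = (((w.length - 1 : Nat)) : Int) by omega,
        PySem.List.pyGetD_natCast, List.getLast_eq_getElem]
      have hlt : w.length - 1 < w.length := by omega
      simp [List.getD, hlt]
    have hmid : (PySem.List.pyRange 2 ((w.length : Int) - 1) 1).map
          (fun k => if k = 1 then PySem.List.pyGetD w ((w.length : Int) - 1) ' '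
            else if k = (w.length : Int) - 1 then PySem.List.pyGetD w 1 ' '
            else PySem.List.pyGetD w k ' ')
        = (w.drop 2).take (w.length - 3) := by
      rw [List.map_congr_left (g := fun k => PySem.List.pyGetD w k ' ')]
      · rw [show ((w.length : Int) - 1) = (((w.length - 1 : Nat)) : Int) by omega,
          show (2 : Int) = ((2 : Nat) : Int) by norm_num]
        rw [pvMapRangeGetD w 2 (w.length - 1) (by omega)]
        rw [List.drop_take]
        congr 1
      · intro k hk
        rw [PySem.List.mem_pyRange_one] at hk
        have hk1 : ¬ k = 1 := by omega
        have hk2 : ¬ k = (w.length : Int) - 1 := by omega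
        simp [hk1, hk2]
    rw [pvEncWordA, if_neg hne1, if_neg hne2, pvEncWordB]
    show _ = _ ++ (PySem.List.pyRange 1 (w.length : Int) 1).map _
    rw [hsplit, List.map_append, List.map_append]
    simp only [List.map_cons, List.map_nil]
    rw [hmid]
    have hx1 : ¬ ((w.length : Int) - 1 = 1) := by omega
    simp only [if_pos rfl, if_neg hx1, if_pos rfl, hgetlast, hAlast, hA1, hslice]
    simp

theorem pvFoldSet_eq_map (f : List Char → List Char) (post : List (List Char)) :
    ∀ (pre : List (List Char)),
    (PySem.List.enumerate post (pre.length : Int)).foldl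
      (fun acc iw => if iw.2 ≠ [] then PySem.List.pySetD acc iw.1 (f iw.2) else acc) (pre ++ post)
    = pre ++ post.map (fun w => if w ≠ [] then f w else w) := by
  induction post with
  | nil => intro pre; simp [PySem.List.enumerate]
  | cons w ws ih =>
    intro pre
    rw [PySem.List.enumerate_cons, List.foldl_cons]
    have hset : (if w ≠ [] then
        PySem.List.pySetD (pre ++ w :: ws) (pre.length : Int) (f w) else pre ++ w :: ws)
        = pre ++ (if w ≠ [] then f w else w) :: ws := by
      by_cases hw : w = []
      · simp [hw]
      · simp only [hw, ne_eq, not_false_eq_true, if_true, PySem.List.pySetD_natCast]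
        rw [List.set_append]
        simp
    rw [hset]
    have hlen : ((pre.length : Int) + 1) = (((pre ++ [if w ≠ [] then f w else w]).length : Nat) : Int) := by
      simp
    rw [hlen]
    have h2 := ih (pre ++ [if w ≠ [] then f w else w])
    rw [List.append_assoc] at h2
    simp only [List.singleton_append] at h2
    rw [h2]
    simp

-- ===== VERDICT (by name: the statement is the Claim_ definition above) =====
theorem encrypt_this_spec : Claim_equal_encrypt_this := by
  intro text hdom
  unfold Spec_encrypt_this encrypt_this encrypt_this_alt
  have hdom' : ∀ c ∈ text.toList, pvDomChar c = true := by
    simpa [Dom_encrypt_this, pvDomStr, List.all_eq_true] using hdom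
  have hfold := pvFoldSet_eq_map pvEncWordA (PySem.Chars.split₀ text.toList) []
  simp only [List.length_nil, Nat.cast_zero, List.nil_append] at hfold
  simp only [hfold]
  rw [split₀_eq_pvTok text.toList hdom', pvScanB_eq_map]
  congr 2
  apply List.map_congr_left
  intro w hw
  have hne := pvTok_ne_nil text.toList w hw
  simp only [hne, ne_eq, not_false_eq_true, if_true]
  exact pvEncWord_eq w hne
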